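-- pv_equiv track=rewrite | github.com/pypi-data/pypi-mirror-158 | packages/astrape/astrape-0.7.114.tar.gz/astrape-0.7.114/astrape/utilities/utils.py | rearrange_dims
-- ===== SOURCE A (Python) =====
-- from itertools import permutations
--
-- def rearrange_dims(dims, in_format, dataformats="NCHW"):
--     def find_mapping(in_format, dataformats):
--         mappings = list(permutations([0,1,2]))
--         c_to_i = {"C" : 0, "H" : 1, "W" : 2}
--         in_format_array = []
--         dataformat_array = []
--         for c_in, c_out in zip(in_format, dataformats):
--             if c_in != "N" and c_out != "N":
--                 in_format_array.append(int(c_to_i[c_in]))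
--                 dataformat_array.append(int(c_to_i[c_out]))
--         for mapping in mappings:
--             mapped = list((in_format_array[mapping[0]], in_format_array[mapping[1]], in_format_array[mapping[2]]))
--             if mapped == dataformat_array:
--                 return mapping
--
--     if isinstance(dims, int):
--             raise ValueError(f"Wrong dimension {dims} for an input.")
--     elif len(dims) == 2:
--         height = dims[0]
--         width = dims[1]
--         dims = (1, height, width)
--     elif len(dims) == 3:
--         mapping = find_mapping(in_format, dataformats)
--         dims = tuple([dims[mapping[0]], dims[mapping[1]], dims[mapping[2]]])
--
--     else:
--         raise ValueError(f"Wrong dimension {dims} for an input.")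
--     return dims
-- ===== SOURCE B (Python) =====
-- def rearrange_dims(dims, in_format, dataformats="NCHW"):
--     if isinstance(dims, int):
--         raise ValueError(f"Wrong dimension {dims} for an input.")
--     if len(dims) == 2:
--         return (1, dims[0], dims[1])
--     if len(dims) != 3:
--         raise ValueError(f"Wrong dimension {dims} for an input.")
--     c_to_i = {"C": 0, "H": 1, "W": 2}
--     pairs = [(a, b) for a, b in zip(in_format, dataformats) if a != "N" and b != "N"]
--     src = [c_to_i[a] for a, _ in pairs]
--     tgt = [c_to_i[b] for _, b in pairs]
--     # greedy first-unused matching: for each target value pick the first unused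
--     # source index carrying it (equals the lexicographically first permutation)
--     used = [False] * len(src)
--     perm = []
--     for t in tgt:
--         for j in range(len(src)):
--             if src[j] == t and not used[j]:
--                 used[j] = True
--                 perm.append(j)
--                 break
--         else:
--             raise ValueError(f"No mapping from {in_format} to {dataformats}.")
--     return tuple(dims[j] for j in perm)
-- ===== Notes on version B (the rewrite author's own statement) =====
-- stated objective: simpler
-- what changed: find_mapping's brute-force enumeration of all 6 permutations of [0,1,2] is replaced by a direct greedy match: for each target value pick the first unused source index carrying it (which equals the lexicographically first permutation A finds), so no permutation list is ever built.
import Mathlib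
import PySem

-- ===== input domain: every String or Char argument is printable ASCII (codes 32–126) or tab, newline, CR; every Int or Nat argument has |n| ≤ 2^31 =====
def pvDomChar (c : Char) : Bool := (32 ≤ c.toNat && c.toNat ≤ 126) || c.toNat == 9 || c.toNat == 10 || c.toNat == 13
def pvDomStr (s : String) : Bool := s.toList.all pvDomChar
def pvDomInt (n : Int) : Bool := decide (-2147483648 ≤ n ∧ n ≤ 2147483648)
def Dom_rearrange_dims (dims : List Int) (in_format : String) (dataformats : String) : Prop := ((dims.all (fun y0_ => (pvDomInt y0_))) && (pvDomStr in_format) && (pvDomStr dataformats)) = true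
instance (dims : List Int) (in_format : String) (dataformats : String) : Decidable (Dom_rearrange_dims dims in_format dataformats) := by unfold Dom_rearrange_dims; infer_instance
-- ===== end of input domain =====

-- B replaces A's brute-force enumeration of all 6 permutations by a direct greedy
-- first-unused-index matching of each target value (objective: simpler); equal return
-- values on all inputs where A returns normally (Pre_ excludes A's exceptions).

-- ===== PORT A =====
-- c_to_i = {"C":0, "H":1, "W":2}
def pvCtoiA : PySem.Dict Char Int := PySem.Dict.ofList [('C', 0), ('H', 1), ('W', 2)]
-- c_to_i[c]; KeyError (none) is excluded by Pre_, the .getD 0 is unreachable there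
def pvLookA (c : Char) : Int := (pvCtoiA.get? c).getD 0
-- xs[i]; IndexError (none) is excluded by Pre_, the .getD 0 is unreachable there
def pvGetA (xs : List Int) (i : Int) : Int := (PySem.List.pyGet? xs i).getD 0
-- the filter test of the loop: c_in != "N" and c_out != "N"
def pvKeepA (p : Char × Char) : Bool := p.1 != 'N' && p.2 != 'N'
-- the building loop over zip(in_format, dataformats) appending to both arrays
def pvBuildA (pairs : List (Char × Char)) : List Int × List Int :=
  pairs.foldl
    (fun acc p =>
      (if pvKeepA p then acc.1 ++ [pvLookA p.1] else acc.1,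
       if pvKeepA p then acc.2 ++ [pvLookA p.2] else acc.2))
    ([], [])
-- mappings = list(permutations([0,1,2]))
def pvMappingsA : List (List Int) := PySem.List.permutations ([0, 1, 2] : List Int) 3
-- for mapping in mappings: if mapped == dataformat_array: return mapping
def pvFindLoopA (ia da : List Int) : List (List Int) → Option (List Int)
  | [] => none
  | m :: ms =>
    if [pvGetA ia (pvGetA m 0), pvGetA ia (pvGetA m 1), pvGetA ia (pvGetA m 2)] = da then some m
    else pvFindLoopA ia da ms
-- def find_mapping(in_format, dataformats); None (falls off the end) makes the caller raise TypeError
def pvFindMappingA (in_format dataformats : String) : Option (List Int) :=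
  let arrs := pvBuildA (in_format.toList.zip dataformats.toList)
  pvFindLoopA arrs.1 arrs.2 pvMappingsA

def rearrange_dims (dims : List Int) (in_format : String) (dataformats : String) : Int × Int × Int :=
  if dims.length = 2 then
    (1, pvGetA dims 0, pvGetA dims 1)
  else if dims.length = 3 then
    match pvFindMappingA in_format dataformats with
    | some m => (pvGetA dims (pvGetA m 0), pvGetA dims (pvGetA m 1), pvGetA dims (pvGetA m 2))
    | none => (0, 0, 0)   -- Python raises TypeError (None subscript); excluded by Pre_
  else (0, 0, 0)          -- Python raises ValueError; excluded by Pre_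

-- ===== PORT B =====
def pvCtoiB : PySem.Dict Char Int := PySem.Dict.ofList [('C', 0), ('H', 1), ('W', 2)]
def pvLookB (c : Char) : Int := (pvCtoiB.get? c).getD 0
def pvGetB (xs : List Int) (i : Int) : Int := (PySem.List.pyGet? xs i).getD 0
-- inner loop: first index j with src[j] == t and not used[j] (Python's j is an int)
def pvPickB : List Int → List Bool → Int → Option Int
  | [], _, _ => none
  | _ :: _, [], _ => none          -- unreachable: used has the same length as src
  | x :: xs, u :: us, t => if x = t ∧ u = false then some 0 else (pvPickB xs us t).map (· + 1)
-- outer loop over tgt accumulating perm; the none branch is Python's raise ValueError, excluded by Pre_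
def pvGreedyB (src : List Int) : List Int → List Bool → List Int → List Int
  | [], _, perm => perm
  | t :: ts, used, perm =>
    match pvPickB src used t with
    | some j => pvGreedyB src ts (used.set j.toNat true) (perm ++ [j])
    | none => perm

def rearrange_dims_alt (dims : List Int) (in_format : String) (dataformats : String) : Int × Int × Int :=
  if dims.length = 2 then
    (1, pvGetB dims 0, pvGetB dims 1)
  else if dims.length ≠ 3 then (0, 0, 0)   -- Python raises ValueError; excluded by Pre_
  else
    let pairs := (in_format.toList.zip dataformats.toList).filter (fun p => p.1 != 'N' && p.2 != 'N')
    let src := pairs.map (fun p => pvLookB p.1)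
    let tgt := pairs.map (fun p => pvLookB p.2)
    let perm := pvGreedyB src tgt (List.replicate src.length false) []
    -- tuple(dims[j] for j in perm); |perm| = 3 under Pre_
    (pvGetB dims (pvGetB perm 0), pvGetB dims (pvGetB perm 1), pvGetB dims (pvGetB perm 2))

-- ===== PRECONDITION & SPEC =====
-- the value c_to_i would give a C/H/W character (used only to STATE the precondition)
def pvCI (c : Char) : Int := if c = 'C' then 0 else if c = 'H' then 1 else 2
-- the zipped character pairs that survive the 'both differ from N' test
def pvPairs (in_format dataformats : String) : List (Char × Char) :=
  (in_format.toList.zip dataformats.toList).filter (fun p => p.1 != 'N' && p.2 != 'N')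
-- Pre_ = exactly the inputs where A returns: len(dims) = 2, or len(dims) = 3 with every kept
-- character in C/H/W (else KeyError), exactly three kept pairs (else IndexError / no mapping)
-- whose source values are a permutation of the target values (else the mapping is None → TypeError).
def Pre_rearrange_dims (dims : List Int) (in_format : String) (dataformats : String) : Prop :=
  dims.length = 2 ∨
    (dims.length = 3 ∧
      (∀ p ∈ pvPairs in_format dataformats, p.1 ∈ (['C', 'H', 'W'] : List Char) ∧ p.2 ∈ (['C', 'H', 'W'] : List Char)) ∧
      (pvPairs in_format dataformats).length = 3 ∧
      ((pvPairs in_format dataformats).map (fun p => pvCI p.1)).Perm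
        ((pvPairs in_format dataformats).map (fun p => pvCI p.2)))
instance (dims : List Int) (in_format : String) (dataformats : String) : Decidable (Pre_rearrange_dims dims in_format dataformats) := by unfold Pre_rearrange_dims; infer_instance

def pvWitness_rearrange_dims : List Int × String × String := ([5, 6, 7], "NCHW", "NHWC")

def Spec_rearrange_dims (dims : List Int) (in_format : String) (dataformats : String) (out : Int × Int × Int) : Prop := out = rearrange_dims_alt dims in_format dataformats
instance (dims : List Int) (in_format : String) (dataformats : String) (out : Int × Int × Int) : Decidable (Spec_rearrange_dims dims in_format dataformats out) := by unfold Spec_rearrange_dims; infer_instance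

-- ===== CLAIM (what is proved, stated in full; the proofs are below) =====
def Claim_equal_rearrange_dims : Prop := ∀ (dims : List Int) (in_format : String) (dataformats : String), Dom_rearrange_dims dims in_format dataformats → Pre_rearrange_dims dims in_format dataformats → Spec_rearrange_dims dims in_format dataformats (rearrange_dims dims in_format dataformats)


-- ===== LEMMAS AND PROOFS =====
-- indexing a 3-element literal list
theorem pvGet_zero (a b c : Int) : pvGetA [a, b, c] 0 = a := by
  simp [pvGetA, PySem.List.pyGet?, PySem.List.pyIdx?]
theorem pvGet_one (a b c : Int) : pvGetA [a, b, c] 1 = b := by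
  simp [pvGetA, PySem.List.pyGet?, PySem.List.pyIdx?]
theorem pvGet_two (a b c : Int) : pvGetA [a, b, c] 2 = c := by
  simp [pvGetA, PySem.List.pyGet?, PySem.List.pyIdx?]

-- the building loop builds the two filtered-and-mapped arrays
theorem pvBuildA_eq (ps : List (Char × Char)) :
    pvBuildA ps = ((ps.filter pvKeepA).map (fun p => pvLookA p.1),
                   (ps.filter pvKeepA).map (fun p => pvLookA p.2)) := by
  unfold pvBuildA
  rw [PySem.List.foldl_prod_mk
        (f := fun s e => if pvKeepA e then s ++ [pvLookA e.1] else s)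
        (g := fun s e => if pvKeepA e then s ++ [pvLookA e.2] else s),
      PySem.List.foldl_append_if, PySem.List.foldl_append_if]
  simp

theorem pvGetB_eq_A : pvGetB = pvGetA := rfl

-- the dict lookup agrees with pvCI on the C/H/W characters
theorem pvLookA_eq_CI (c : Char) (h : c ∈ (['C', 'H', 'W'] : List Char)) : pvLookA c = pvCI c := by
  fin_cases h <;> rfl

theorem pvCI_mem (c : Char) : pvCI c ∈ ([0, 1, 2] : List Int) := by
  unfold pvCI; split_ifs <;> simp

-- the two mapping searches agree on every matchable pair of value triples
theorem pvKey : ∀ x0 ∈ ([0,1,2]:List Int), ∀ x1 ∈ ([0,1,2]:List Int), ∀ x2 ∈ ([0,1,2]:List Int),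
    ∀ y0 ∈ ([0,1,2]:List Int), ∀ y1 ∈ ([0,1,2]:List Int), ∀ y2 ∈ ([0,1,2]:List Int),
    ([x0,x1,x2]:List Int).Perm [y0,y1,y2] →
    pvFindLoopA [x0,x1,x2] [y0,y1,y2] pvMappingsA ≠ none ∧
    pvGreedyB [x0,x1,x2] [y0,y1,y2] [false,false,false] [] =
      (pvFindLoopA [x0,x1,x2] [y0,y1,y2] pvMappingsA).elim [] (fun m => [pvGetA m 0, pvGetA m 1, pvGetA m 2]) := by
  decide

-- ===== VERDICT (by name: the statement is the Claim_ definition above) =====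
theorem rearrange_dims_spec : Claim_equal_rearrange_dims := by
  intro dims in_format dataformats _ hpre
  unfold Spec_rearrange_dims
  rcases hpre with h2 | ⟨h3, hch, hlen, hperm⟩
  · simp [rearrange_dims, rearrange_dims_alt, h2, pvGetB_eq_A]
  · have hpairs : (in_format.toList.zip dataformats.toList).filter pvKeepA
        = pvPairs in_format dataformats := rfl
    obtain ⟨p0, p1, p2, hps⟩ := List.length_eq_three.mp hlen
    have hc0 := hch p0 (by rw [hps]; simp)
    have hc1 := hch p1 (by rw [hps]; simp)
    have hc2 := hch p2 (by rw [hps]; simp)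
    have hbuild : pvBuildA (in_format.toList.zip dataformats.toList)
        = ([pvCI p0.1, pvCI p1.1, pvCI p2.1], [pvCI p0.2, pvCI p1.2, pvCI p2.2]) := by
      rw [pvBuildA_eq, hpairs, hps]
      simp [pvLookA_eq_CI _ hc0.1, pvLookA_eq_CI _ hc1.1, pvLookA_eq_CI _ hc2.1,
            pvLookA_eq_CI _ hc0.2, pvLookA_eq_CI _ hc1.2, pvLookA_eq_CI _ hc2.2]
    have hperm' : ([pvCI p0.1, pvCI p1.1, pvCI p2.1] : List Int).Perm
        [pvCI p0.2, pvCI p1.2, pvCI p2.2] := by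
      rw [hps] at hperm; simpa using hperm
    obtain ⟨hne, hgreedy⟩ := pvKey _ (pvCI_mem _) _ (pvCI_mem _) _ (pvCI_mem _)
      _ (pvCI_mem _) _ (pvCI_mem _) _ (pvCI_mem _) hperm'
    obtain ⟨m, hm⟩ := Option.ne_none_iff_exists'.mp hne
    rw [hm] at hgreedy
    simp only [Option.elim] at hgreedy
    have h23 : dims.length ≠ 2 := by omega
    rw [rearrange_dims, rearrange_dims_alt, if_neg h23, if_neg h23, if_pos h3, if_neg (by omega)]
    rw [pvFindMappingA]
    have hB : (in_format.toList.zip dataformats.toList).filter (fun p => p.1 != 'N' && p.2 != 'N')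
        = pvPairs in_format dataformats := rfl
    have hL : pvLookB = pvLookA := rfl
    simp only [hbuild, pvGetB_eq_A, hm, hB, hps, List.map_cons, List.map_nil, hL,
      pvLookA_eq_CI _ hc0.1, pvLookA_eq_CI _ hc1.1, pvLookA_eq_CI _ hc2.1,
      pvLookA_eq_CI _ hc0.2, pvLookA_eq_CI _ hc1.2, pvLookA_eq_CI _ hc2.2]
    have hrep : List.replicate ([pvCI p0.1, pvCI p1.1, pvCI p2.1] : List Int).length false = [false, false, false] := rfl
    rw [hrep, hgreedy]
    simp [pvGet_zero, pvGet_one, pvGet_two]
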